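-- pv_equiv track=rewrite | github.com/susooo/Algorithm | 프로그래머스/2/42586. 기능개발/기능개발.py | solution
-- ===== SOURCE A (Python) =====
-- def solution(progresses, speeds):
--     answer = []
--     days = []
--     for i in range(len(progresses)):
--         if (100 - progresses[i])%speeds[i] == 0:
--             value = (100 - progresses[i])//speeds[i]
--         else:
--             value = ((100 - progresses[i])//speeds[i])+1
--         days.append(value)
--
--     max = days.pop(0)
--     count = 1
--     while days:
--         a1 = days.pop(0)
--         if a1 <= max:
--             count+=1
--         else:
--             max = a1
--             answer.append(count)
--             count=1
--     answer.append(count)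
--     return answer
-- ===== SOURCE B (Python) =====
-- def solution(progresses, speeds):
--     # pass 1: running prefix maxima of ceil((100-p)/s)
--     maxes = []
--     m = None
--     for p, s in zip(progresses, speeds):
--         d = -((p - 100) // s)
--         if m is None or d > m:
--             m = d
--         maxes.append(m)
--     # pass 2: run-length encode the prefix-max sequence
--     answer = []
--     prev = None
--     for x in maxes:
--         if prev is not None and x == prev:
--             answer[-1] += 1
--         else:
--             answer.append(1)
--             prev = x
--     return answer
-- ===== Notes on version B (the rewrite author's own statement) =====
-- stated objective: faster
-- what changed: B replaces A's pop-from-front running max/count accumulator (each days.pop(0) shifts the whole list) with a two-pass linear pipeline: one pass building the prefix-maximum sequence of ceiling days computed by the single formula -((p-100)//s), then a run-length-encoding pass over that sequence; group sizes are the run lengths.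
import Mathlib
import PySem

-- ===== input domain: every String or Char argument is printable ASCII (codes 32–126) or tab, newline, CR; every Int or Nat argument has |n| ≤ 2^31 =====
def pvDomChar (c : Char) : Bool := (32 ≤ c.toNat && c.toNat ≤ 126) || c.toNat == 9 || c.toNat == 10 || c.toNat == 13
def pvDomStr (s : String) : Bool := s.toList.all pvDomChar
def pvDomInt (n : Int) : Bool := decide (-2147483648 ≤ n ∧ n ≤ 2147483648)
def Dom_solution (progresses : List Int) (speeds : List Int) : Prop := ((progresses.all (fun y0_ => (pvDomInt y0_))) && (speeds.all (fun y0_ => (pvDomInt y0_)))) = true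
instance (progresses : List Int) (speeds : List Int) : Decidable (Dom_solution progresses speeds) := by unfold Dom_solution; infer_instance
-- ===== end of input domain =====

-- B replaces A's pop-from-front running max/count scan with a prefix-maximum pass followed by a
-- run-length-encoding pass; equal return values are proved on Pre_ (nonempty input, enough nonzero speeds).

-- ===== PORT A =====
-- the 'while days: a1 = days.pop(0) …' loop, with state (max, count, answer)
def solutionLoop : List Int → Int → Int → List Int → List Int
  | [], _, count, answer => answer ++ [count]
  | a1 :: rest, mx, count, answer =>
    if a1 ≤ mx then solutionLoop rest mx (count + 1) answer
    else solutionLoop rest a1 1 (answer ++ [count])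

def solution (progresses : List Int) (speeds : List Int) : List Int :=
  let days := (PySem.List.pyRange 0 (progresses.length : Int) 1).foldl
    (fun ds i =>
      ds ++ [if PySem.Int.mod (100 - PySem.List.pyGetD progresses i 0) (PySem.List.pyGetD speeds i 0) = 0
             then PySem.Int.floordiv (100 - PySem.List.pyGetD progresses i 0) (PySem.List.pyGetD speeds i 0)
             else PySem.Int.floordiv (100 - PySem.List.pyGetD progresses i 0) (PySem.List.pyGetD speeds i 0) + 1]) []
  match days with
  | [] => []   -- Python raises IndexError on days.pop(0) here; excluded by Pre_solution
  | m0 :: rest => solutionLoop rest m0 1 []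

-- ===== PORT B =====
-- answer[-1] += 1
def incLast : List Int → List Int
  | [] => []
  | [x] => [x + 1]
  | x :: y :: l => x :: incLast (y :: l)

-- pass-1 loop body: d = -((p-100)//s); m = d if m is None or d > m else m; maxes.append(m)
def bstep (acc : List Int × Option Int) (ps : Int × Int) : List Int × Option Int :=
  let d := -(PySem.Int.floordiv (ps.1 - 100) ps.2)
  let m := match acc.2 with
    | none => d
    | some mv => if d > mv then d else mv
  (acc.1 ++ [m], some m)

-- pass-2 loop body: if prev is not None and x == prev: answer[-1] += 1 else: answer.append(1); prev = x
def rstep (acc : List Int × Option Int) (x : Int) : List Int × Option Int :=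
  match acc.2 with
  | some pv => if x = pv then (incLast acc.1, acc.2) else (acc.1 ++ [1], some x)
  | none => (acc.1 ++ [1], some x)

def solution_alt (progresses : List Int) (speeds : List Int) : List Int :=
  -- pass 1: running prefix maxima of the ceiling days, state (maxes, m : Option Int)
  let maxes := ((progresses.zip speeds).foldl bstep ([], none)).1
  -- pass 2: run-length encode the prefix-max sequence, state (answer, prev : Option Int)
  (maxes.foldl rstep ([], none)).1

-- ===== PRECONDITION & SPEC =====
-- Pre_ excludes exactly the inputs where A raises: empty progresses (days.pop(0) → IndexError),
-- speeds shorter than progresses (IndexError), and a zero speed at a used index (ZeroDivisionError).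
def Pre_solution (progresses : List Int) (speeds : List Int) : Prop :=
  progresses ≠ [] ∧ progresses.length ≤ speeds.length ∧
    ∀ s ∈ speeds.take progresses.length, s ≠ 0
instance (progresses : List Int) (speeds : List Int) : Decidable (Pre_solution progresses speeds) := by
  unfold Pre_solution; infer_instance
def pvWitness_solution : List Int × List Int := ([93, 30, 55], [1, 30, 5])

def Spec_solution (progresses : List Int) (speeds : List Int) (out : List Int) : Prop := out = solution_alt progresses speeds
instance (progresses : List Int) (speeds : List Int) (out : List Int) : Decidable (Spec_solution progresses speeds out) := by unfold Spec_solution; infer_instance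

-- ===== CLAIM (what is proved, stated in full; the proofs are below) =====
def Claim_equal_solution : Prop := ∀ (progresses : List Int) (speeds : List Int), Dom_solution progresses speeds → Pre_solution progresses speeds → Spec_solution progresses speeds (solution progresses speeds)

-- ===== LEMMAS AND PROOFS =====

-- ceiling division over ediv/emod: (if a % b == 0 then a/b else a/b+1) = -((-a)/b), for 0 < b
theorem ceil_ediv (a b : Int) (h : 0 < b) :
    (if a % b = 0 then a / b else a / b + 1) = -((-a) / b) := by
  have hd := Int.mul_ediv_add_emod a b
  have hd2 := Int.mul_ediv_add_emod (-a) b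
  have h1 : 0 ≤ a % b := Int.emod_nonneg a (by omega)
  have h2 : a % b < b := Int.emod_lt_of_pos a h
  have h3 : 0 ≤ (-a) % b := Int.emod_nonneg (-a) (by omega)
  have h4 : (-a) % b < b := Int.emod_lt_of_pos (-a) h
  have hsum : b * (a / b + (-a) / b) + (a % b + (-a) % b) = 0 := by ring_nf; linarith
  have hle : b * (a / b + (-a) / b) ≤ b * 0 := by linarith
  have hgt : b * (-2) < b * (a / b + (-a) / b) := by linarith
  have hle' : a / b + (-a) / b ≤ 0 := le_of_mul_le_mul_left hle h
  have hgt' : (-2 : Int) < a / b + (-a) / b := lt_of_mul_lt_mul_left (by linarith) (le_of_lt h)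
  rcases (by omega : a / b + (-a) / b = 0 ∨ a / b + (-a) / b = -1) with hc | hc <;>
    rw [hc] at hsum <;> split_ifs with hz <;> omega

-- B's single ceiling formula -((p-100)//s) equals A's mod-test branch, for s ≠ 0
theorem ceil_eq (a b : Int) (hb : b ≠ 0) :
    (if PySem.Int.mod a b = 0 then PySem.Int.floordiv a b else PySem.Int.floordiv a b + 1)
      = -(PySem.Int.floordiv (-a) b) := by
  rcases lt_or_gt_of_ne hb with hneg | hpos
  · have hpos' : (0:Int) < -b := by omega
    have h1 := PySem.Int.mod_neg_neg (-a) (-b)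
    rw [neg_neg, neg_neg] at h1
    have h2 := PySem.Int.floordiv_neg_neg (-a) (-b)
    rw [neg_neg, neg_neg] at h2
    have h3 := PySem.Int.floordiv_neg_neg a (-b)
    rw [neg_neg] at h3
    rw [h1, h2, h3, PySem.Int.mod_eq_emod_of_pos hpos',
        PySem.Int.floordiv_eq_ediv_of_pos hpos', PySem.Int.floordiv_eq_ediv_of_pos hpos']
    have := ceil_ediv (-a) (-b) hpos'
    rw [neg_neg] at this
    simpa [neg_eq_zero] using this
  · rw [PySem.Int.mod_eq_emod_of_pos hpos, PySem.Int.floordiv_eq_ediv_of_pos hpos,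
        PySem.Int.floordiv_eq_ediv_of_pos hpos]
    exact ceil_ediv a b hpos

-- the ceiling-day value B computes per (progress, speed) pair
def fday (ps : Int × Int) : Int := -(PySem.Int.floordiv (ps.1 - 100) ps.2)

-- A's index-loop days list equals the map of fday over the zipped pairs
theorem days_eq (p s : List Int) (hlen : p.length ≤ s.length)
    (hnz : ∀ x ∈ s.take p.length, x ≠ 0) :
    (PySem.List.pyRange 0 (p.length : Int) 1).foldl
      (fun ds i =>
        ds ++ [if PySem.Int.mod (100 - PySem.List.pyGetD p i 0) (PySem.List.pyGetD s i 0) = 0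
               then PySem.Int.floordiv (100 - PySem.List.pyGetD p i 0) (PySem.List.pyGetD s i 0)
               else PySem.Int.floordiv (100 - PySem.List.pyGetD p i 0) (PySem.List.pyGetD s i 0) + 1]) []
      = (p.zip s).map fday := by
  rw [PySem.List.foldl_append_singleton_eq_map
    (fun i => if PySem.Int.mod (100 - PySem.List.pyGetD p i 0) (PySem.List.pyGetD s i 0) = 0
              then PySem.Int.floordiv (100 - PySem.List.pyGetD p i 0) (PySem.List.pyGetD s i 0)
              else PySem.Int.floordiv (100 - PySem.List.pyGetD p i 0) (PySem.List.pyGetD s i 0) + 1)]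
  simp only [List.nil_append]
  apply List.ext_getElem
  · simp [PySem.List.length_pyRange_one, List.length_zip, Nat.min_eq_left hlen]
  · intro k hk1 hk2
    have hkp : k < p.length := by
      simpa [List.length_zip, Nat.min_eq_left hlen] using hk2
    have hks : k < s.length := lt_of_lt_of_le hkp hlen
    have hrange : k < (PySem.List.pyRange 0 (p.length : Int) 1).length := by
      simpa [PySem.List.length_pyRange_one] using hkp
    rw [List.getElem_map, List.getElem_map, PySem.List.getElem_pyRange_one 0 (p.length : Int) k hrange,
        List.getElem_zip]
    have hz : (0 : Int) + (k : Int) = ((k : Nat) : Int) := by omega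
    rw [hz, PySem.List.pyGetD_natCast, PySem.List.pyGetD_natCast,
        List.getD_eq_getElem p 0 hkp, List.getD_eq_getElem s 0 hks]
    have hsnz : s[k] ≠ 0 := by
      apply hnz
      have : (s.take p.length)[k]'(by simpa [List.length_take, Nat.min_eq_left] using lt_min hkp hks) = s[k] :=
        List.getElem_take
      rw [← this]; exact List.getElem_mem _
    have := ceil_eq (100 - p[k]) s[k] hsnz
    simpa [fday, show -(100 - p[k]) = p[k] - 100 by ring] using this

-- functional form of A's while-loop (no answer accumulator)
def grp : List Int → Int → Int → List Int
  | [], _, c => [c]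
  | a :: t, m, c => if a ≤ m then grp t m (c + 1) else c :: grp t a 1

theorem loop_eq_grp (t : List Int) : ∀ (m c : Int) (ans : List Int),
    solutionLoop t m c ans = ans ++ grp t m c := by
  induction t with
  | nil => intro m c ans; simp [solutionLoop, grp]
  | cons a t ih =>
    intro m c ans
    by_cases h : a ≤ m
    · simp [solutionLoop, grp, h, ih]
    · simp [solutionLoop, grp, h, ih]

-- prefix maxima with running maximum m
def pmAux : Int → List Int → List Int
  | _, [] => []
  | m, a :: t => (if a > m then a else m) :: pmAux (if a > m then a else m) t

def pmLast : Int → List Int → Int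
  | m, [] => m
  | m, a :: t => pmLast (if a > m then a else m) t

-- B's first foldl, once started, computes pmAux
theorem maxes_eq (l : List (Int × Int)) : ∀ (acc : List Int) (m : Int),
    l.foldl bstep (acc, some m)
    = (acc ++ pmAux m (l.map fday), some (pmLast m (l.map fday))) := by
  induction l with
  | nil => intro acc m; simp [pmAux, pmLast]
  | cons ps l ih =>
    intro acc m
    simp only [List.foldl_cons, List.map_cons, pmAux, pmLast, bstep]
    rw [ih]
    simp [fday, List.append_assoc]

-- functional run-length encoding with current value v and count c
def rleAux : List Int → Int → Int → List Int
  | [], _, c => [c]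
  | x :: t, v, c => if x = v then rleAux t v (c + 1) else c :: rleAux t x 1

def rleLast : List Int → Int → Int
  | [], v => v
  | x :: t, v => rleLast t (if x = v then v else x)

theorem incLast_append (acc : List Int) (c : Int) : incLast (acc ++ [c]) = acc ++ [c + 1] := by
  induction acc with
  | nil => simp [incLast]
  | cons a acc ih =>
    cases acc with
    | nil => simp [incLast]
    | cons b acc' => simpa [incLast] using ih

-- B's second foldl, once started, computes rleAux
theorem rle_fold (xs : List Int) : ∀ (acc : List Int) (v c : Int),
    xs.foldl rstep (acc ++ [c], some v)
    = (acc ++ rleAux xs v c, some (rleLast xs v)) := by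
  induction xs with
  | nil => intro acc v c; simp [rleAux, rleLast]
  | cons x t ih =>
    intro acc v c
    by_cases h : x = v
    · simp only [List.foldl_cons, rstep, h, rleAux, rleLast, incLast_append]
      simpa [h] using ih acc v (c + 1)
    · simp only [List.foldl_cons, rstep, rleAux, rleLast, if_neg h]
      have := ih (acc ++ [c]) x 1
      rw [List.append_assoc] at this
      simpa [h] using this

-- core: A's grouping of the days equals run-length encoding of their prefix maxima
theorem grp_eq_rle (t : List Int) : ∀ (m c : Int),
    grp t m c = rleAux (pmAux m t) m c := by
  induction t with
  | nil => intro m c; simp [grp, pmAux, rleAux]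
  | cons a t ih =>
    intro m c
    by_cases h : a ≤ m
    · have hm : ¬ a > m := by omega
      simp [grp, pmAux, rleAux, h, hm, ih]
    · have hm : a > m := by omega
      have hne : a ≠ m := by omega
      simp [grp, pmAux, rleAux, h, hm, hne, ih]

-- ===== VERDICT (by name: the statement is the Claim_ definition above) =====
theorem solution_spec : Claim_equal_solution := by
  intro p s _ hpre
  obtain ⟨hne, hlen, hnz⟩ := hpre
  unfold Spec_solution solution solution_alt
  rw [days_eq p s hlen hnz]
  cases hp : p with
  | nil => exact absurd hp hne
  | cons p0 pt =>
    cases hs : s with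
    | nil => subst hp hs; simp at hlen
    | cons s0 st =>
      subst hp hs
      simp only [List.zip_cons_cons, List.map_cons, List.foldl_cons]
      rw [loop_eq_grp, List.nil_append, grp_eq_rle]
      have hb0 : bstep ([], none) (p0, s0) = ([fday (p0, s0)], some (fday (p0, s0))) := by
        simp [bstep, fday]
      rw [hb0, maxes_eq]
      simp only [List.singleton_append, List.foldl_cons]
      have hr0 : rstep ([], none) (fday (p0, s0)) = ([] ++ [1], some (fday (p0, s0))) := by
        simp [rstep]
      rw [hr0, rle_fold]
      simp
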